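-- pv_equiv track=rewrite | github.com/sashinovitasari/POS_Tagger | corpus_preproc.py | count_tag_pair_sentence
-- ===== SOURCE A (Python) =====
-- def tag_loc_in_sentence(parsed_sentence,tag):
-- 	tag_loc = []
-- 	for id_word in range (0,len(parsed_sentence)):
-- 		if (parsed_sentence[id_word][1]).lower()==tag.lower():
-- 			tag_loc.append(id_word)
-- 	return tag_loc
--
-- def count_tag_pair_sentence(parsed_sentence,tag1,tag2):
-- 	tag1_loc = tag_loc_in_sentence(parsed_sentence,tag1)
-- 	if tag1_loc!=[]:
-- 		pair_count=0
-- 		for id_tag1 in tag1_loc: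
-- 			if (id_tag1!=len(parsed_sentence)-1):
-- 				if (parsed_sentence[id_tag1+1][1]).lower()==tag2.lower():
-- 					pair_count+= 1
-- 		return pair_count
-- 	return 0
-- ===== SOURCE B (Python) =====
-- def count_tag_pair_sentence(parsed_sentence, tag1, tag2):
--     t1 = tag1.lower()
--     t2 = tag2.lower()
--     return sum(1 for a, b in zip(parsed_sentence, parsed_sentence[1:])
--                if a[1].lower() == t1 and b[1].lower() == t2)
-- ===== Notes on version B (the rewrite author's own statement) =====
-- stated objective: simpler
-- what changed: Replaces the two-pass design (build a list of tag1 positions with a helper, then re-index the sentence at each stored position) with one linear scan over adjacent pairs via zip, keeping no index list and lowering the tags once.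
import Mathlib
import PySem

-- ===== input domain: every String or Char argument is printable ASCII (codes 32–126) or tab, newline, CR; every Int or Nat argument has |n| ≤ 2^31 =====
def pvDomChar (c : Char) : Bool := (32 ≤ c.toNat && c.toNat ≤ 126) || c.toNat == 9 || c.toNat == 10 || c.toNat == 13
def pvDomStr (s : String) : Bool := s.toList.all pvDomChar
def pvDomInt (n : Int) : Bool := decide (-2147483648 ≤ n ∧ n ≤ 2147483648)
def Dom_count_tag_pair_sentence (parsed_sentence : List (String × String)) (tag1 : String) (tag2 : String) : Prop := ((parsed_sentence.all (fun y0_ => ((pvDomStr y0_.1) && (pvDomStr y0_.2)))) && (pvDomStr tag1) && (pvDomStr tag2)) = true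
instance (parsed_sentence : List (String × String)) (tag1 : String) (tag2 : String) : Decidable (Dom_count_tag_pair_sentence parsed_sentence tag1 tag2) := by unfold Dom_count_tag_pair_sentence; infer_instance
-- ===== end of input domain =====

-- B replaces A's two-pass design (index list of tag1 positions, then re-indexing) with one zip scan over adjacent pairs; proved equal on all inputs.


-- ===== PORT A =====
-- helper tag_loc_in_sentence: indices are drawn from range(0, len), so every pyGetD is in range (exact).
def tag_loc_in_sentence (parsed_sentence : List (String × String)) (tag : String) : List Int :=
  (PySem.List.pyRange 0 (parsed_sentence.length : Int) 1).foldl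
    (fun acc id_word =>
      if PySem.Str.lower (PySem.List.pyGetD parsed_sentence id_word ("", "")).2 == PySem.Str.lower tag
      then acc ++ [id_word] else acc) []

def count_tag_pair_sentence (parsed_sentence : List (String × String)) (tag1 : String) (tag2 : String) : Int :=
  let tag1_loc := tag_loc_in_sentence parsed_sentence tag1
  if tag1_loc ≠ [] then
    tag1_loc.foldl
      (fun pair_count id_tag1 =>
        if id_tag1 ≠ (parsed_sentence.length : Int) - 1 then
          -- id_tag1 + 1 is then in range, pyGetD exact
          if PySem.Str.lower (PySem.List.pyGetD parsed_sentence (id_tag1 + 1) ("", "")).2 == PySem.Str.lower tag2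
          then pair_count + 1 else pair_count
        else pair_count) 0
  else 0

-- ===== PORT B =====
-- parsed_sentence[1:] on a list is drop 1 (exact); zip/sum of the generator is a fold over the zipped list.
def count_tag_pair_sentence_alt (parsed_sentence : List (String × String)) (tag1 : String) (tag2 : String) : Int :=
  let t1 := PySem.Str.lower tag1
  let t2 := PySem.Str.lower tag2
  (parsed_sentence.zip (parsed_sentence.drop 1)).foldl
    (fun c ab => if PySem.Str.lower ab.1.2 == t1 && PySem.Str.lower ab.2.2 == t2 then c + 1 else c) 0

-- ===== PRECONDITION & SPEC =====
def Spec_count_tag_pair_sentence (parsed_sentence : List (String × String)) (tag1 : String) (tag2 : String) (out : Int) : Prop := out = count_tag_pair_sentence_alt parsed_sentence tag1 tag2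
instance (parsed_sentence : List (String × String)) (tag1 : String) (tag2 : String) (out : Int) : Decidable (Spec_count_tag_pair_sentence parsed_sentence tag1 tag2 out) := by unfold Spec_count_tag_pair_sentence; infer_instance

-- ===== CLAIM (what is proved, stated in full; the proofs are below) =====
def Claim_equal_count_tag_pair_sentence : Prop := ∀ (parsed_sentence : List (String × String)) (tag1 : String) (tag2 : String), Dom_count_tag_pair_sentence parsed_sentence tag1 tag2 → Spec_count_tag_pair_sentence parsed_sentence tag1 tag2 (count_tag_pair_sentence parsed_sentence tag1 tag2)

-- ===== LEMMAS AND PROOFS =====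

-- The zipped pair list is the adjacent-pair table indexed by range (n-1).
lemma zip_drop_eq_map_range (ps : List (String × String)) :
    ps.zip (ps.drop 1)
      = (List.range (ps.length - 1)).map (fun k => (ps.getD k ("", ""), ps.getD (k + 1) ("", ""))) := by
  apply List.ext_getElem
  · simp
  · intro i h1 h2
    simp only [List.length_zip, List.length_drop] at h1
    have hi : i < ps.length - 1 := by omega
    have hd : 1 + i < ps.length := by omega
    simp only [List.getElem_zip, List.getElem_map, List.getElem_range, List.getElem_drop]
    rw [List.getD_eq_getElem ps ("", "") (by omega : i < ps.length),
        List.getD_eq_getElem ps ("", "") (by omega : i + 1 < ps.length)]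
    simp [Nat.add_comm]

-- Core counting identity: A's doubly-filtered index count equals B's adjacent-pair count.
lemma core_count (ps : List (String × String)) (tag1 tag2 : String) :
    ((((PySem.List.pyRange 0 (ps.length : Int) 1).filter
        (fun i => PySem.Str.lower (PySem.List.pyGetD ps i ("", "")).2 == PySem.Str.lower tag1)).filter
        (fun i => decide (i ≠ (ps.length : Int) - 1))).countP
        (fun i => PySem.Str.lower (PySem.List.pyGetD ps (i + 1) ("", "")).2 == PySem.Str.lower tag2))
      = (ps.zip (ps.drop 1)).countP
        (fun ab => PySem.Str.lower ab.1.2 == PySem.Str.lower tag1 && PySem.Str.lower ab.2.2 == PySem.Str.lower tag2) := by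
  rw [List.countP_filter, List.countP_filter, PySem.List.pyRange_zero_nat, List.countP_map,
    zip_drop_eq_map_range, List.countP_map]
  cases hn : ps.length with
  | zero => simp
  | succ m =>
    rw [List.range_succ, List.countP_append, Nat.add_sub_cancel]
    have hsing : ∀ (p : ℕ → Bool), p m = false → List.countP p [m] = 0 := by
      intro p hp; simp [hp]
    rw [hsing _ (by simp [Function.comp]), Nat.add_zero]
    apply List.countP_congr
    intro k hk
    have hk' : k < m := List.mem_range.mp hk
    simp only [Function.comp]
    rw [PySem.List.pyGetD_natCast]
    have h1 : ((k : Int) + 1) = ((k + 1 : Nat) : Int) := by push_cast; ring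
    rw [h1, PySem.List.pyGetD_natCast]
    simp [Bool.and_comm]
    omega

theorem count_tag_pair_sentence_spec_aux (ps : List (String × String)) (tag1 tag2 : String) :
    count_tag_pair_sentence ps tag1 tag2 = count_tag_pair_sentence_alt ps tag1 tag2 := by
  simp only [count_tag_pair_sentence, count_tag_pair_sentence_alt, tag_loc_in_sentence]
  rw [PySem.List.foldl_append_if_eq_filter, List.nil_append]
  rw [PySem.List.foldl_ite_eq_foldl_filter]
  rw [PySem.List.foldl_if_add_one]
  rw [PySem.List.foldl_if_add_one]
  rw [zero_add, zero_add]
  rw [← core_count ps tag1 tag2]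
  split
  · rfl
  · next h =>
    simp only [ne_eq, not_not] at h
    rw [h]
    simp

-- ===== VERDICT (by name: the statement is the Claim_ definition above) =====
theorem count_tag_pair_sentence_spec : Claim_equal_count_tag_pair_sentence := by
  intro ps tag1 tag2 _
  exact count_tag_pair_sentence_spec_aux ps tag1 tag2
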